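-- pv_equiv track=rewrite | github.com/pypi-data/pypi-mirror-183 | packages/mat-rajagopal/mat_rajagopal-0.0.4.tar.gz/mat_rajagopal-0.0.4/mat_rajagopal/mat_raja.py | unitnum_mat
-- ===== SOURCE A (Python) =====
-- def unitnum_mat(m,dim):
--     mat1=[]
--     for i in range(dim):
--         a=[]
--         for j in range(dim):
--             if i==j:
--                 s=m
--             else :
--                 s=0
--             a.append(s)
--         mat1.append(a)
--     return mat1
-- ===== SOURCE B (Python) =====
-- def unitnum_mat(m, dim):
--     # The flattened diagonal matrix is periodic: m followed by dim zeros,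
--     # repeated; its rows are consecutive chunks of length dim.
--     flat = ([m] + [0] * dim) * dim
--     return [flat[r * dim:(r + 1) * dim] for r in range(dim)]
-- ===== Notes on version B (the rewrite author's own statement) =====
-- stated objective: alternative
-- what changed: B exploits the periodic structure of the flattened matrix: it builds one flat list ([m]+[0]*dim)*dim in which m recurs with period dim+1, then cuts it into dim chunks of length dim by slicing; there is no per-element i==j test and no per-row diagonal placement.
import Mathlib
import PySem

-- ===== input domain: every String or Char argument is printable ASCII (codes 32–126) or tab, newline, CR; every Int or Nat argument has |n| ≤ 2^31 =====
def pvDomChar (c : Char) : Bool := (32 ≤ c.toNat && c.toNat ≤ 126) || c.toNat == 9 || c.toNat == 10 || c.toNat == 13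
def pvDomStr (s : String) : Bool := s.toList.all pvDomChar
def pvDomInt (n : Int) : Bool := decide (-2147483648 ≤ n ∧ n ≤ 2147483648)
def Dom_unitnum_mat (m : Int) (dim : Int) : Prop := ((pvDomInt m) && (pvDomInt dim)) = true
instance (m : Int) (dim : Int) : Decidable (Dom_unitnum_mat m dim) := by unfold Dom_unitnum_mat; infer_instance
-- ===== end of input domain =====

-- B builds one flat periodic list ([m]+[0]*dim)*dim and slices it into dim rows, instead of A's nested loop with an i==j test per cell (objective: alternative).

-- ===== PORT A =====
def unitnum_mat (m : Int) (dim : Int) : List (List Int) :=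
  (PySem.List.pyRange 0 dim 1).foldl (fun mat1 i =>
    mat1 ++ [(PySem.List.pyRange 0 dim 1).foldl (fun a j =>
      a ++ [if i = j then m else 0]) []]) []

-- ===== PORT B =====
-- Python '([m] + [0]*dim) * dim' = flatten of dim copies; 'flat[r*dim:(r+1)*dim]' = PySem slice.
def unitnum_mat_alt (m : Int) (dim : Int) : List (List Int) :=
  let flat := (List.replicate dim.toNat (m :: List.replicate dim.toNat (0 : Int))).flatten
  (PySem.List.pyRange 0 dim 1).map (fun r =>
    PySem.List.slice flat (some (r * dim)) (some ((r + 1) * dim)))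

-- ===== PRECONDITION & SPEC =====
def Spec_unitnum_mat (m : Int) (dim : Int) (out : List (List Int)) : Prop := out = unitnum_mat_alt m dim
instance (m : Int) (dim : Int) (out : List (List Int)) : Decidable (Spec_unitnum_mat m dim out) := by unfold Spec_unitnum_mat; infer_instance

-- ===== CLAIM (what is proved, stated in full; the proofs are below) =====
def Claim_equal_unitnum_mat : Prop := ∀ (m : Int) (dim : Int), Dom_unitnum_mat m dim → Spec_unitnum_mat m dim (unitnum_mat m dim)

-- ===== LEMMAS AND PROOFS =====

-- the flat list is periodic with period n+1: m exactly at the multiples of n+1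
lemma flat_getElem (m : Int) (n : Nat) : ∀ (c t : Nat) (ht : t < ((List.replicate c (m :: List.replicate n (0 : Int))).flatten).length),
    ((List.replicate c (m :: List.replicate n (0 : Int))).flatten)[t] = if t % (n + 1) = 0 then m else 0 := by
  intro c
  induction c with
  | zero => intro t ht; simp at ht
  | succ c ih =>
    intro t ht
    simp only [List.replicate_succ, List.flatten_cons]
    by_cases h : t < n + 1
    · rw [List.getElem_append_left (by simpa using h)]
      rcases t with _ | t
      · simp
      · have ht' : t < n := by omega
        simp only [List.getElem_cons_succ, List.getElem_replicate]
        have : ¬ (t + 1) % (n + 1) = 0 := by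
          rw [Nat.mod_eq_of_lt (by omega)]; omega
        simp [this]
    · have hlen : (m :: List.replicate n (0 : Int)).length = n + 1 := by simp
      rw [List.getElem_append_right (by omega)]
      rw [ih]
      have : (t - (m :: List.replicate n (0 : Int)).length) % (n + 1) = t % (n + 1) := by
        rw [hlen]
        conv_rhs => rw [show t = (t - (n + 1)) + 1 * (n + 1) by omega]
        rw [Nat.add_mul_mod_self_right]
      rw [this]

-- length of the flat list
lemma flat_length (m : Int) (n c : Nat) :
    ((List.replicate c (m :: List.replicate n (0 : Int))).flatten).length = c * (n + 1) := by
  induction c with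
  | zero => simp
  | succ c ih => rw [List.replicate_succ, List.flatten_cons]; simp [ih]; ring

-- m sits at position k*n+j of the flat list iff j = k (for j, k < n)
lemma flat_row_elem (m : Int) (n k j : Nat) (hk : k < n) (hj : j < n)
    (ht : k * n + j < ((List.replicate n (m :: List.replicate n (0 : Int))).flatten).length) :
    ((List.replicate n (m :: List.replicate n (0 : Int))).flatten)[k * n + j]
      = if k = j then m else 0 := by
  rw [flat_getElem]
  by_cases hkj : k = j
  · subst hkj
    have : k * n + k = k * (n + 1) := by ring
    simp [this]
  · have hne : ¬ (k * n + j) % (n + 1) = 0 := by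
      intro h0
      have hdvd : (n + 1) ∣ (k * n + j) := Nat.dvd_of_mod_eq_zero h0
      have hdvd2 : (n + 1) ∣ k * (n + 1) := Dvd.intro k (mul_comm _ _)
      have hexp : k * (n + 1) = k * n + k := by ring
      by_cases hlt : j < k
      · have h3 : (n + 1) ∣ (k * (n + 1) - (k * n + j)) := Nat.dvd_sub hdvd2 hdvd
        have h4 : k * (n + 1) - (k * n + j) = k - j := by omega
        rw [h4] at h3
        have := Nat.le_of_dvd (by omega) h3
        omega
      · have h3 : (n + 1) ∣ ((k * n + j) - k * (n + 1)) := Nat.dvd_sub hdvd hdvd2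
        have h4 : (k * n + j) - k * (n + 1) = j - k := by omega
        rw [h4] at h3
        have := Nat.le_of_dvd (by omega) h3
        omega
    simp [hne, hkj]

-- A's row i equals B's slice of the flat list, for 0 ≤ i < dim
lemma row_eq (m dim i : Int) (h0 : 0 ≤ i) (h1 : i < dim) :
    (PySem.List.pyRange 0 dim 1).map (fun j => if i = j then m else 0)
      = PySem.List.slice ((List.replicate dim.toNat (m :: List.replicate dim.toNat (0 : Int))).flatten)
          (some (i * dim)) (some ((i + 1) * dim)) := by
  set n := dim.toNat with hn
  set k := i.toNat with hk
  have hdim : dim = (n : Int) := by omega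
  have hi : i = (k : Int) := by omega
  have hkn : k < n := by omega
  rw [PySem.List.slice_toNat (ha := mul_nonneg h0 (by omega)) (hb := mul_nonneg (by omega) (by omega))]
  have e1 : (i * dim).toNat = k * n := by
    rw [hi, hdim, ← Nat.cast_mul, Int.toNat_natCast]
  have e2 : ((i + 1) * dim).toNat = (k + 1) * n := by
    have h : (i + 1) * dim = (((k + 1) * n : Nat) : Int) := by
      rw [hi, hdim]; push_cast; ring
    rw [h, Int.toNat_natCast]
  rw [e1, e2]
  have e3 : (k + 1) * n - k * n = n := by
    have h : (k + 1) * n = k * n + n := by ring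
    omega
  rw [e3]
  apply List.ext_getElem
  · rw [List.length_map, PySem.List.length_pyRange_one, List.length_take, List.length_drop,
      flat_length]
    have h : k * n + n ≤ n * (n + 1) := by nlinarith
    omega
  · intro j hjl hjr
    rw [List.length_take, List.length_drop, flat_length] at hjr
    have hjn : j < n := by omega
    simp only [List.getElem_map]
    rw [PySem.List.getElem_pyRange_one, List.getElem_take, List.getElem_drop,
      flat_row_elem m n k j hkn hjn]
    have hij : (i = 0 + (j : Int)) ↔ k = j := by omega
    simp only [hij]

-- ===== VERDICT (by name: the statement is the Claim_ definition above) =====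
theorem unitnum_mat_spec : Claim_equal_unitnum_mat := by
  intro m dim _
  unfold Spec_unitnum_mat unitnum_mat unitnum_mat_alt
  rw [PySem.List.foldl_append_singleton_eq_map]
  simp only [List.nil_append]
  apply List.map_congr_left
  intro i hi
  rw [PySem.List.mem_pyRange_one] at hi
  rw [PySem.List.foldl_append_singleton_eq_map, List.nil_append,
    row_eq m dim i hi.1 hi.2]
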